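-- pv_equiv track=rewrite | github.com/groboclown/petronia | projects/extension-tools/petronia_extension_tools/gen_marshal/structure.py | sort_import_packages
-- ===== SOURCE A (Python) =====
-- from typing import Dict, List, Sequence, Iterable, Set, Tuple, Union, Optional, Any
-- import functools
--
-- def sort_import_packages(src: Iterable[str]) -> List[str]:
--     """Sorts the imports to prevent warnings from pylint."""
--
--     def get_leading_dot_count(item: str) -> int:
--         count = 0
--         for i in item:
--             if i != '.':
--                 break
--             count += 1
--         return count
--
--     def compare(left: str, right: str) -> int:  # pylint:disable=too-many-return-statements
--         if left == right:
--             return 0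
--
--         # By local convention, 'typing' is always first.
--         if left == 'typing':
--             return -1
--         if right == 'typing':
--             return 1
--
--         # relative imports shouldn't happen, but just in case,
--         # they should be last, and ordered by number of leading dots.
--         left_leading_dots = get_leading_dot_count(left)
--         right_leading_dots = get_leading_dot_count(right)
--         if left_leading_dots != right_leading_dots:
--             # more should be later in the list, so 1 left vs 2 right means left is first.
--             return left_leading_dots - right_leading_dots
--         # Custom library items should be later than stdlib ones.
--         # For our purposes, only 'petronia' libraries matter.
--         left_has_petronia = left.startswith('petronia')
--         right_has_petronia = right.startswith('petronia')
--         if left_has_petronia and not right_has_petronia: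
--             return 1
--         if not left_has_petronia and right_has_petronia:
--             return -1
--         # Both of the items are in the same category, so just sort them.
--         if left < right:
--             return -1
--         # Already tested for equality, so the only remaining case is left > right
--         return 1
--
--     ret = list(src)
--     ret.sort(key=functools.cmp_to_key(compare))
--     return ret
-- ===== SOURCE B (Python) =====
-- def sort_import_packages(src):
--     """Sorts the imports to prevent warnings from pylint.
--
--     Multi-pass stable sort: pull the 'typing' entries out, then sort the rest
--     by each criterion from least to most significant — Python's sort is
--     stable, so later passes preserve the order established by earlier ones.
--     """
--     items = list(src)
--     rest = [x for x in items if x != 'typing']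
--     rest.sort()                                            # lexicographic tie-break
--     rest.sort(key=lambda x: x.startswith('petronia'))      # stdlib before petronia
--     rest.sort(key=lambda x: len(x) - len(x.lstrip('.')))   # relative imports last
--     return ['typing'] * (len(items) - len(rest)) + rest
-- ===== Notes on version B (the rewrite author's own statement) =====
-- stated objective: faster
-- what changed: Replaced the single cmp_to_key comparator sort by a filter that pulls out the 'typing' entries plus three stable single-key sort passes run least-significant-key first (lexicographic, then petronia flag, then leading-dot count), relying on sort stability to compose the ordering.
import Mathlib
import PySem

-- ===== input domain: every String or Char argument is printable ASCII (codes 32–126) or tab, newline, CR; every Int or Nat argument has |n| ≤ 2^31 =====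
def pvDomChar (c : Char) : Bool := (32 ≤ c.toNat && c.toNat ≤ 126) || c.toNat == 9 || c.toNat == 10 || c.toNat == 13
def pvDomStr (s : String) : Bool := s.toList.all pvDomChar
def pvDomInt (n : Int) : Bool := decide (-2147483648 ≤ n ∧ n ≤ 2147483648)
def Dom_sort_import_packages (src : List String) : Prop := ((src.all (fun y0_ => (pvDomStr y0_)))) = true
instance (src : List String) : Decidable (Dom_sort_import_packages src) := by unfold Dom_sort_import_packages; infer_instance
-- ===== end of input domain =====

-- B replaces A's single cmp_to_key comparator sort by a filter plus three stable single-key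
-- sort passes (least-significant key first); equal return values proved below.

-- ===== PORT A =====
-- get_leading_dot_count: count leading '.' chars, breaking at the first non-dot
def pvGldc : List Char → Int
  | [] => 0
  | c :: t => if c ≠ '.' then 0 else 1 + pvGldc t

-- the comparator `compare`; Python's `left < right` on str is code-point lexicographic = Mathlib's `<` on String
def pvCompare (left right : String) : Int :=
  if left = right then 0
  else if left = "typing" then -1
  else if right = "typing" then 1
  else
    let left_leading_dots := pvGldc left.toList
    let right_leading_dots := pvGldc right.toList
    if left_leading_dots ≠ right_leading_dots then left_leading_dots - right_leading_dots
    else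
      let left_has_petronia := PySem.Str.startswith left "petronia"
      let right_has_petronia := PySem.Str.startswith right "petronia"
      if left_has_petronia && !right_has_petronia then 1
      else if !left_has_petronia && right_has_petronia then -1
      else if left < right then -1
      else 1

-- ret.sort(key=functools.cmp_to_key(compare)) is Python's stable sort driven by the comparator;
-- rendered as PySem's stable insertion-sort loop (the loop shape of PySem.List.sorted) with `compare a b < 0` as the order
def sort_import_packages (src : List String) : List String :=
  src.foldl (fun acc x => PySem.List.insertBy (fun a b => decide (pvCompare a b < 0)) x acc) []

-- ===== PORT B =====
-- len(x) - len(x.lstrip('.')): lstrip('.') drops the leading dots, ported as dropWhile (exact)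
def pvDots (x : String) : Int := (x.toList.length : Int) - ((x.toList.dropWhile (· == '.')).length : Int)
def pvPet (x : String) : Bool := PySem.Str.startswith x "petronia"

-- B: filter out 'typing', three stable sorted passes (lexicographic, petronia flag, dot count),
-- then the 'typing' copies in front; each list.sort(...) is PySem.List.sorted with that pass's key
def sort_import_packages_alt (src : List String) : List String :=
  let items := src
  let rest := items.filter (fun x => decide (x ≠ "typing"))
  let r1 := PySem.List.sorted rest (fun x => x) false
  let r2 := PySem.List.sorted r1 (fun x => pvPet x) false
  let r3 := PySem.List.sorted r2 (fun x => pvDots x) false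
  List.replicate (items.length - rest.length) "typing" ++ r3

-- ===== PRECONDITION & SPEC =====
def Spec_sort_import_packages (src : List String) (out : List String) : Prop := out = sort_import_packages_alt src
instance (src : List String) (out : List String) : Decidable (Spec_sort_import_packages src out) := by unfold Spec_sort_import_packages; infer_instance

-- ===== CLAIM (what is proved, stated in full; the proofs are below) =====
def Claim_equal_sort_import_packages : Prop := ∀ (src : List String), Dom_sort_import_packages src → Spec_sort_import_packages src (sort_import_packages src)

-- ===== LEMMAS AND PROOFS =====

-- the combined import-ordering key: (typing flag, leading dots, petronia flag, the string), lexicographically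
def pvTy (x : String) : Int := if x = "typing" then 0 else 1
def pvK (x : String) : Int ×ₗ (Int ×ₗ (Bool ×ₗ String)) :=
  toLex (pvTy x, toLex (pvDots x, toLex (pvPet x, x)))

theorem pvK_injective : Function.Injective pvK := by
  intro a b h
  simpa using congrArg (fun p => (ofLex (ofLex (ofLex p).2).2).2) h

theorem pv_dots_eq (x : String) : pvDots x = pvGldc x.toList := by
  unfold pvDots
  induction x.toList with
  | nil => simp [pvGldc]
  | cons c t ih =>
    by_cases h : c = '.'
    · subst h
      simp only [List.dropWhile_cons, beq_self_eq_true, if_true, List.length_cons, pvGldc,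
        ne_eq, not_true_eq_false, if_false]
      push_cast
      omega
    · have hb : (c == '.') = false := by simp [h]
      simp [hb, pvGldc, h]

-- the comparator's "strictly before" is exactly strict order of the combined key
theorem pv_cmp_iff_key_lt (a b : String) : pvCompare a b < 0 ↔ pvK a < pvK b := by
  have hK : pvK a < pvK b ↔
      pvTy a < pvTy b ∨ pvTy a = pvTy b ∧ (pvDots a < pvDots b ∨ pvDots a = pvDots b ∧
        (pvPet a < pvPet b ∨ pvPet a = pvPet b ∧ a < b)) := by
    unfold pvK
    rw [Prod.Lex.toLex_lt_toLex]
    simp only [Prod.Lex.toLex_lt_toLex]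
  rw [hK]
  by_cases hab : a = b
  · subst hab
    simp [pvCompare, lt_self_iff_false]
  · by_cases hat : a = "typing"
    · have hbt : ¬ b = "typing" := fun h => hab (by rw [hat, h])
      simp only [pvCompare, if_neg hab, pvTy, if_pos hat, if_neg hbt]
      norm_num
    · by_cases hbt : b = "typing"
      · simp only [pvCompare, if_neg hab, pvTy, if_neg hat, if_pos hbt]
        constructor
        · omega
        · rintro (h | ⟨h, -⟩) <;> omega
      · have hty : pvTy a = pvTy b := by simp [pvTy, hat, hbt]
        simp only [pvCompare, if_neg hab, if_neg hat, if_neg hbt, hty, lt_self_iff_false,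
          false_or, true_and, pv_dots_eq]
        by_cases hd : pvGldc a.toList = pvGldc b.toList
        · simp only [hd, ne_eq, not_true_eq_false, if_false, lt_self_iff_false, false_or,
            true_and]
          unfold pvPet
          cases hlp : PySem.Str.startswith a "petronia" <;>
            cases hrp : PySem.Str.startswith b "petronia" <;>
              simp only [if_true, Bool.not_true, Bool.not_false,
                Bool.and_true, Bool.and_false, lt_self_iff_false, false_or, true_and] <;>
            · by_cases hlt : a < b <;> simp [hlt]
        · simp only [ne_eq, hd, not_false_eq_true, if_true, false_and, or_false]
          omega

-- A's foldl IS PySem's stable sort by the combined key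
theorem pvA_eq_sorted (src : List String) :
    sort_import_packages src = PySem.List.sorted src pvK false := by
  rw [PySem.List.sorted_eq_foldl_insertBy]
  unfold sort_import_packages
  have hfe : (fun (a b : String) => decide (pvCompare a b < 0)) =
      (fun a b => decide (pvK a < pvK b)) := by
    funext a b
    rw [Bool.eq_iff_iff, decide_eq_true_eq, decide_eq_true_eq]
    exact pv_cmp_iff_key_lt a b
  rw [hfe]

-- ===== stability of PySem.List.sorted =====
-- R k j: sorted by k, and stable w.r.t. a pre-existing j order on ties
def pvR {α κ ι : Type} [LinearOrder κ] [LinearOrder ι] (k : α → κ) (j : α → ι) (a b : α) : Prop :=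
  k a < k b ∨ (k a = k b ∧ j a ≤ j b)

theorem pv_insertBy_stable {α κ ι : Type} [LinearOrder κ] [LinearOrder ι]
    (k : α → κ) (j : α → ι) (x : α) (acc : List α)
    (hacc : acc.Pairwise (pvR k j)) (hj : ∀ y ∈ acc, j y ≤ j x) :
    (PySem.List.insertBy (fun a b => decide (k a < k b)) x acc).Pairwise (pvR k j) := by
  induction acc with
  | nil => simp [PySem.List.insertBy]
  | cons y ys ih =>
    by_cases hxy : k x < k y
    · simp only [PySem.List.insertBy, decide_eq_true_eq, if_pos hxy]
      refine List.Pairwise.cons ?_ hacc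
      intro z hz
      rw [List.mem_cons] at hz
      rcases hz with rfl | hz
      · exact Or.inl hxy
      · have hyz := (List.pairwise_cons.mp hacc).1 z hz
        rcases hyz with h | ⟨h, -⟩
        · exact Or.inl (lt_trans hxy h)
        · exact Or.inl (h ▸ hxy)
    · simp only [PySem.List.insertBy, decide_eq_true_eq, if_neg hxy]
      refine List.Pairwise.cons ?_ (ih (List.pairwise_cons.mp hacc).2
        (fun z hz => hj z (List.mem_cons_of_mem _ hz)))
      intro z hz
      rw [PySem.List.mem_insertBy] at hz
      rcases hz with rfl | hz
      · rcases lt_or_eq_of_le (le_of_not_gt hxy) with h | h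
        · exact Or.inl h
        · exact Or.inr ⟨h, hj y (List.mem_cons_self)⟩
      · exact (List.pairwise_cons.mp hacc).1 z hz

theorem pv_foldl_stable {α κ ι : Type} [LinearOrder κ] [LinearOrder ι]
    (k : α → κ) (j : α → ι) (l acc : List α)
    (hacc : acc.Pairwise (pvR k j))
    (hcross : ∀ y ∈ acc, ∀ x ∈ l, j y ≤ j x)
    (hl : l.Pairwise (fun a b => j a ≤ j b)) :
    (l.foldl (fun acc x => PySem.List.insertBy (fun a b => decide (k a < k b)) x acc) acc).Pairwise
      (pvR k j) := by
  induction l generalizing acc with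
  | nil => simpa using hacc
  | cons x t ih =>
    simp only [List.foldl_cons]
    refine ih _ (pv_insertBy_stable k j x acc hacc
      (fun y hy => hcross y hy x List.mem_cons_self)) ?_ (List.pairwise_cons.mp hl).2
    intro y hy z hz
    rw [PySem.List.mem_insertBy] at hy
    rcases hy with rfl | hy
    · exact (List.pairwise_cons.mp hl).1 z hz
    · exact hcross y hy z (List.mem_cons_of_mem _ hz)

theorem pv_sorted_stable {α κ ι : Type} [LinearOrder κ] [LinearOrder ι]
    (k : α → κ) (j : α → ι) (l : List α) (hl : l.Pairwise (fun a b => j a ≤ j b)) :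
    (PySem.List.sorted l k false).Pairwise (pvR k j) := by
  rw [PySem.List.sorted_eq_foldl_insertBy]
  exact pv_foldl_stable k j l [] (by simp) (by simp) hl

-- ===== B's output is sorted by the combined key =====
theorem pvB_pairwise (src : List String) :
    (sort_import_packages_alt src).Pairwise (fun a b => pvK a ≤ pvK b) := by
  unfold sort_import_packages_alt
  set rest := src.filter (fun x => decide (x ≠ "typing")) with hrest
  have h1 : (PySem.List.sorted rest (fun x => x) false).Pairwise (fun a b : String => a ≤ b) :=
    PySem.List.sorted_pairwise rest (fun x => x)
  have h2 := pv_sorted_stable (fun x => pvPet x) (fun x => x) _ h1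
  have h2' : (PySem.List.sorted (PySem.List.sorted rest (fun x => x) false)
      (fun x => pvPet x) false).Pairwise
      (fun a b => toLex (pvPet a, a) ≤ toLex (pvPet b, b)) := by
    refine h2.imp ?_
    intro a b hab
    rw [Prod.Lex.toLex_le_toLex]
    exact hab
  have h3 := pv_sorted_stable (fun x => pvDots x) (fun x => toLex (pvPet x, x)) _ h2'
  have h3' : (PySem.List.sorted (PySem.List.sorted (PySem.List.sorted rest (fun x => x) false)
      (fun x => pvPet x) false) (fun x => pvDots x) false).Pairwise
      (fun a b => toLex (pvDots a, toLex (pvPet a, a)) ≤ toLex (pvDots b, toLex (pvPet b, b))) := by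
    refine h3.imp ?_
    intro a b hab
    rw [Prod.Lex.toLex_le_toLex]
    exact hab
  rw [List.pairwise_append]
  refine ⟨List.pairwise_replicate.mpr (Or.inr (le_refl _)), ?_, ?_⟩
  · refine h3'.imp_of_mem ?_
    intro a b ha hb hab
    have ha' : a ∈ rest :=
      (PySem.List.mem_sorted _ _ _ _).mp ((PySem.List.mem_sorted _ _ _ _).mp
        ((PySem.List.mem_sorted _ _ _ _).mp ha))
    have hb' : b ∈ rest :=
      (PySem.List.mem_sorted _ _ _ _).mp ((PySem.List.mem_sorted _ _ _ _).mp
        ((PySem.List.mem_sorted _ _ _ _).mp hb))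
    have hat : a ≠ "typing" := by
      have := List.of_mem_filter ha'; simpa using this
    have hbt : b ≠ "typing" := by
      have := List.of_mem_filter hb'; simpa using this
    unfold pvK
    rw [Prod.Lex.toLex_le_toLex]
    right
    exact ⟨by simp [pvTy, hat, hbt], hab⟩
  · intro a ha b hb
    have ha' : a = "typing" := (List.eq_of_mem_replicate ha)
    have hb' : b ∈ rest :=
      (PySem.List.mem_sorted _ _ _ _).mp ((PySem.List.mem_sorted _ _ _ _).mp
        ((PySem.List.mem_sorted _ _ _ _).mp hb))
    have hbt : b ≠ "typing" := by
      have := List.of_mem_filter hb'; simpa using this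
    unfold pvK
    rw [Prod.Lex.toLex_le_toLex]
    left
    simp [pvTy, ha', hbt]

-- ===== B's output is a permutation of src =====
theorem pvB_perm (src : List String) : (sort_import_packages_alt src).Perm src := by
  unfold sort_import_packages_alt
  set rest := src.filter (fun x => decide (x ≠ "typing")) with hrest
  have hperm3 : (PySem.List.sorted (PySem.List.sorted (PySem.List.sorted rest (fun x => x) false)
      (fun x => pvPet x) false) (fun x => pvDots x) false).Perm rest :=
    ((PySem.List.sorted_perm _ _ _).trans (PySem.List.sorted_perm _ _ _)).trans
      (PySem.List.sorted_perm _ _ _)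
  have hsplit : (src.filter (fun x => decide (x = "typing")) ++ rest).Perm src := by
    have := List.filter_append_perm (fun x => decide (x = "typing")) src
    have hneg : src.filter (fun x => !decide (x = "typing")) = rest := by
      rw [hrest]; congr 1; funext x; simp
    rwa [hneg] at this
  have htyp : src.filter (fun x => decide (x = "typing")) =
      List.replicate (src.length - rest.length) "typing" := by
    have hlen : (src.filter (fun x => decide (x = "typing"))).length + rest.length = src.length := by
      have := hsplit.length_eq
      simpa using this
    refine List.eq_replicate_iff.mpr ⟨by omega, ?_⟩
    intro b hb
    have := List.of_mem_filter hb
    simpa using this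
  have hstep : (List.replicate (src.length - rest.length) "typing" ++
      PySem.List.sorted (PySem.List.sorted (PySem.List.sorted rest (fun x => x) false)
        (fun x => pvPet x) false) (fun x => pvDots x) false).Perm
      (src.filter (fun x => decide (x = "typing")) ++ rest) := by
    rw [htyp]
    exact List.Perm.append_left _ hperm3
  exact hstep.trans hsplit

-- ===== VERDICT (by name: the statement is the Claim_ definition above) =====
theorem sort_import_packages_spec : Claim_equal_sort_import_packages := by
  intro src _
  unfold Spec_sort_import_packages
  refine PySem.List.eq_of_perm_of_pairwise_le_of_injective pvK pvK_injective ?_ ?_ (pvB_pairwise src)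
  · rw [pvA_eq_sorted]
    exact (PySem.List.sorted_perm _ _ _).trans (pvB_perm src).symm
  · rw [pvA_eq_sorted]
    exact PySem.List.sorted_pairwise src pvK
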